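-- pv_equiv track=rewrite | github.com/gsethupathy5/AI_For_CS | python/2572.count-the-number-of-square-free-subsets/solution.py | squareFreeSubsets
-- ===== SOURCE A (Python) =====
-- from typing import List
--
-- def squareFreeSubsets(nums: List[int]) -> int:
--     MOD = 10**9 + 7
--     def is_square_free(n):
--         i = 2
--         while i * i <= n:
--             if n % (i * i) == 0:
--                 return False
--             i += 1
--         return True
--
--     def dfs(nums, pos, current_product, current_subset, res):
--         if current_product != 1 and is_square_free(current_product):
--             res[0] += 1
--         for i in range(pos, len(nums)):
--             dfs(nums, i + 1, current_product * nums[i], current_subset + [nums[i]], res)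
--
--     res = [0]
--     dfs(nums, 0, 1, [], res)
--     return res[0] % MOD
-- ===== SOURCE B (Python) =====
-- from typing import List
--
-- def squareFreeSubsets(nums: List[int]) -> int:
--     MOD = 10**9 + 7
--
--     def sf(n):
--         # square-free test by dividing out each factor once
--         i = 2
--         while i * i <= n:
--             if n % i == 0:
--                 n //= i
--                 if n % i == 0:
--                     return False
--             i += 1
--         return True
--
--     # prod_count[p] = number of subsets of the prefix seen so far whose product is p
--     prod_count = {1: 1}
--     for x in nums:
--         new = dict(prod_count)
--         for p, c in prod_count.items():
--             q = p * x
--             new[q] = new.get(q, 0) + c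
--         prod_count = new
--
--     total = 0
--     for p, c in prod_count.items():
--         if p != 1 and sf(p):
--             total += c
--     return total % MOD
-- ===== Notes on version B (the rewrite author's own statement) =====
-- stated objective: alternative
-- what changed: Replaces A's exponential depth-first recursion over all subsets (one trial-division square-free test per subset) by a single left-to-right pass maintaining a dict from subset product to multiplicity, so equal products are merged and the square-free test (rewritten as a divide-out-each-factor-once loop) runs once per distinct product.
import Mathlib
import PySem

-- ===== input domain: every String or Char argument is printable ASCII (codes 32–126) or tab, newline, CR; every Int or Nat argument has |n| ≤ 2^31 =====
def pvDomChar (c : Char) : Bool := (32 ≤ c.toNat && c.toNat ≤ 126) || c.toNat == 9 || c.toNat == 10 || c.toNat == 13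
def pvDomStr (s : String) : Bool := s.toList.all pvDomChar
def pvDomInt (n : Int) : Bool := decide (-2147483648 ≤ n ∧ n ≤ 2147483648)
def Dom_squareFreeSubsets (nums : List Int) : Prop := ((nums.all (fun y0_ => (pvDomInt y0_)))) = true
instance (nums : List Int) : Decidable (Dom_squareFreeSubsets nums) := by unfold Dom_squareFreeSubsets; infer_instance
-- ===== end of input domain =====

-- B replaces A's exponential subset recursion by a product→multiplicity dict DP (one
-- square-free check per DISTINCT subset product, with a divide-out test); alternative algorithm.

-- ===== PORT A =====
-- while i * i <= n: if n % (i*i) == 0: return False; i += 1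
def isSqFreeALoop (n : Int) (i : Nat) : Bool :=
  if _h : (i : Int) * i ≤ n then
    if PySem.Int.mod n ((i : Int) * i) == 0 then false
    else isSqFreeALoop n (i + 1)
  else true
termination_by (n + 1 - (i : Int) * i).toNat
decreasing_by
  have h1 : ((i : Int) + 1) * ((i : Int) + 1) = (i : Int) * i + 2 * i + 1 := by ring
  have h2 : (0 : Int) ≤ (i : Int) := by positivity
  push_cast
  omega

def isSqFreeA (n : Int) : Bool := isSqFreeALoop n 2

-- dfs(nums, pos, current_product, current_subset, res): bump res, then loop i over range(pos, len(nums))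
mutual
def dfsA (nums : List Int) (pos : Nat) (prod : Int) (subset : List Int) (res : Int) : Int :=
  let res1 := if prod ≠ 1 ∧ isSqFreeA prod = true then res + 1 else res
  dfsForA nums pos prod subset res1
termination_by (nums.length - pos, 1)

def dfsForA (nums : List Int) (i : Nat) (prod : Int) (subset : List Int) (res : Int) : Int :=
  if h : i < nums.length then
    dfsForA nums (i + 1) prod subset
      (dfsA nums (i + 1) (prod * nums[i]) (subset ++ [nums[i]]) res)
  else res
termination_by (nums.length - i, 0)
decreasing_by
  · apply Prod.Lex.left; omega
  · apply Prod.Lex.left; omega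
end

def squareFreeSubsets (nums : List Int) : Int :=
  PySem.Int.mod (dfsA nums 0 1 [] 0) 1000000007

-- ===== PORT B =====
-- while i * i <= n: if n % i == 0: n //= i; if n % i == 0: return False; i += 1
def isSqFreeBLoop (n : Int) (i : Nat) : Bool :=
  if _h : (i : Int) * i ≤ n then
    if PySem.Int.mod n i == 0 then
      let n' := PySem.Int.floordiv n i
      if PySem.Int.mod n' i == 0 then false
      else isSqFreeBLoop n' (i + 1)
    else isSqFreeBLoop n (i + 1)
  else true
termination_by (n + 1 - (i : Int) * i).toNat
decreasing_by
  · have h1 : ((i : Int) + 1) * ((i : Int) + 1) = (i : Int) * i + 2 * i + 1 := by ring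
    have h2 : (0 : Int) ≤ (i : Int) := by positivity
    have h3 : (0 : Int) ≤ (i : Int) * i := by positivity
    have h4 : PySem.Int.floordiv n i ≤ n := by
      rcases Nat.eq_zero_or_pos i with h0 | h0
      · subst h0; simp [PySem.Int.floordiv]; omega
      · rw [PySem.Int.floordiv_eq_ediv_of_pos (by exact_mod_cast h0)]
        exact Int.ediv_le_self _ (by omega)
    push_cast
    omega
  · have h1 : ((i : Int) + 1) * ((i : Int) + 1) = (i : Int) * i + 2 * i + 1 := by ring
    have h2 : (0 : Int) ≤ (i : Int) := by positivity
    push_cast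
    omega

def isSqFreeB (n : Int) : Bool := isSqFreeBLoop n 2

-- new = dict(prod_count); for p, c in prod_count.items(): new[p*x] = new.get(p*x, 0) + c
def stepB (d : PySem.Dict Int Int) (x : Int) : PySem.Dict Int Int :=
  d.items.foldl (fun nd pc => nd.insert (pc.1 * x) (nd.getD (pc.1 * x) 0 + pc.2)) d

-- total = 0; for p, c in prod_count.items(): if p != 1 and sf(p): total += c
def totalB (d : PySem.Dict Int Int) : Int :=
  d.items.foldl (fun t pc => if pc.1 ≠ 1 ∧ isSqFreeB pc.1 = true then t + pc.2 else t) 0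

def squareFreeSubsets_alt (nums : List Int) : Int :=
  PySem.Int.mod (totalB (nums.foldl stepB (PySem.Dict.ofList [(1, 1)]))) 1000000007

-- ===== PRECONDITION & SPEC =====
def Spec_squareFreeSubsets (nums : List Int) (out : Int) : Prop := out = squareFreeSubsets_alt nums
instance (nums : List Int) (out : Int) : Decidable (Spec_squareFreeSubsets nums out) := by unfold Spec_squareFreeSubsets; infer_instance

-- ===== CLAIM (what is proved, stated in full; the proofs are below) =====
def Claim_equal_squareFreeSubsets : Prop := ∀ (nums : List Int), Dom_squareFreeSubsets nums → Spec_squareFreeSubsets nums (squareFreeSubsets nums)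

-- ===== LEMMAS AND PROOFS =====

-- the per-subset indicator each side counts
def fIndA (p : Int) : Int := if p ≠ 1 ∧ isSqFreeA p = true then 1 else 0
def fIndB (p : Int) : Int := if p ≠ 1 ∧ isSqFreeB p = true then 1 else 0

-- Dc f xs prod = Σ over NONEMPTY subsets s of xs of f (prod * Π s);  Cc also counts the empty subset
def Dc (f : Int → Int) : List Int → Int → Int
  | [], _ => 0
  | x :: xs, prod => (f (prod * x) + Dc f xs (prod * x)) + Dc f xs prod

def Cc (f : Int → Int) (xs : List Int) (prod : Int) : Int := f prod + Dc f xs prod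

-- f-weighted total of a dict
def sumF (f : Int → Int) (d : PySem.Dict Int Int) : Int :=
  (d.items.map (fun pc => f pc.1 * pc.2)).sum

-- ---- the two square-free tests agree ----

theorem sfALoop_char (fuel : Nat) : ∀ (n : Int) (i : Nat), (n + 1 - (i : Int) * i).toNat ≤ fuel →
    (isSqFreeALoop n i = true
      ↔ (∀ k : Nat, i ≤ k → (k : Int) * k ≤ n → ¬ ((k : Int) * (k : Int) ∣ n))) := by
  induction fuel with
  | zero =>
    intro n i hf
    have hii : (0 : Int) ≤ (i : Int) * i := by positivity
    have hgt : ¬ ((i : Int) * i ≤ n) := by omega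
    rw [isSqFreeALoop, dif_neg hgt]
    refine iff_of_true rfl ?_
    intro k hk hkn hd
    have hik : (i : Int) ≤ (k : Int) := by exact_mod_cast hk
    have h0 : (0 : Int) ≤ (i : Int) := by positivity
    nlinarith
  | succ m ih =>
    intro n i hf
    by_cases hle : (i : Int) * i ≤ n
    · rw [isSqFreeALoop, dif_pos hle]
      by_cases hdvd : (i : Int) * (i : Int) ∣ n
      · rw [if_pos (by rw [beq_iff_eq, PySem.Int.mod_eq_zero_iff_dvd]; exact hdvd)]
        refine iff_of_false (by simp) ?_
        intro hP; exact hP i le_rfl hle hdvd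
      · rw [if_neg (by rw [beq_iff_eq, PySem.Int.mod_eq_zero_iff_dvd]; exact hdvd)]
        have h0 : (0 : Int) ≤ (i : Int) := by positivity
        have hexp : ((i : Int) + 1) * ((i : Int) + 1) = (i : Int) * i + 2 * i + 1 := by ring
        rw [ih n (i + 1) (by push_cast; omega)]
        constructor
        · intro h k hk hkn hd
          rcases Nat.eq_or_lt_of_le hk with he | hlt
          · exact hdvd (he ▸ hd)
          · exact h k hlt hkn hd
        · intro h k hk hkn hd
          exact h k (Nat.le_of_succ_le hk) hkn hd
    · rw [isSqFreeALoop, dif_neg hle]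
      refine iff_of_true rfl ?_
      intro k hk hkn hd
      have hik : (i : Int) ≤ (k : Int) := by exact_mod_cast hk
      have h0 : (0 : Int) ≤ (i : Int) := by positivity
      nlinarith

-- any counterexample to squarefreeness below the scan bound has been excluded by the invariant
theorem exitB (n : Int) (i : Nat) (hn : 1 ≤ n) (hgt : ¬ ((i : Int) * i ≤ n))
    (hinv : ∀ j : Nat, 2 ≤ j → j < i → ¬ ((j : Int) ∣ n)) : Squarefree n.toNat := by
  intro x hx
  rcases Nat.lt_or_ge x 2 with h2 | h2
  · interval_cases x
    · exfalso
      have : n.toNat = 0 := Nat.eq_zero_of_zero_dvd (by simpa using hx)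
      omega
    · exact isUnit_one
  · exfalso
    have hxn : x ∣ n.toNat := dvd_trans (dvd_mul_right x x) hx
    have hnt : ((n.toNat : Int)) = n := Int.toNat_of_nonneg (by omega)
    rcases Nat.lt_or_ge x i with hxi | hxi
    · refine hinv x h2 hxi ?_
      have := Int.natCast_dvd_natCast.mpr hxn
      rwa [hnt] at this
    · have h1 : x * x ≤ n.toNat := Nat.le_of_dvd (by omega) hx
      have h2' : i * i ≤ x * x := Nat.mul_le_mul hxi hxi
      have h3 : ((i * i : Nat) : Int) ≤ n := by
        rw [← hnt]; exact_mod_cast le_trans h2' h1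
      push_cast at h3
      exact hgt h3

theorem sfBLoop_char (fuel : Nat) : ∀ (n : Int) (i : Nat), (n + 1 - (i : Int) * i).toNat ≤ fuel →
    2 ≤ i → 1 ≤ n → (∀ j : Nat, 2 ≤ j → j < i → ¬ ((j : Int) ∣ n)) →
    (isSqFreeBLoop n i = true ↔ Squarefree n.toNat) := by
  induction fuel with
  | zero =>
    intro n i hf h2 hn hinv
    have hii : (0 : Int) ≤ (i : Int) * i := by positivity
    have hgt : ¬ ((i : Int) * i ≤ n) := by omega
    rw [isSqFreeBLoop, dif_neg hgt]
    exact iff_of_true rfl (exitB n i hn hgt hinv)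
  | succ m ih =>
    intro n i hf h2 hn hinv
    have hipos : (0 : Int) < (i : Int) := by exact_mod_cast Nat.lt_of_lt_of_le (by norm_num) h2
    have hexp : ((i : Int) + 1) * ((i : Int) + 1) = (i : Int) * i + 2 * i + 1 := by ring
    have h0 : (0 : Int) ≤ (i : Int) := le_of_lt hipos
    by_cases hle : (i : Int) * i ≤ n
    · rw [isSqFreeBLoop, dif_pos hle]
      by_cases hdvd : (i : Int) ∣ n
      · rw [if_pos (by rw [beq_iff_eq, PySem.Int.mod_eq_zero_iff_dvd]; exact hdvd)]
        have hfe : PySem.Int.floordiv n (i : Int) = n / (i : Int) :=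
          PySem.Int.floordiv_eq_ediv_of_pos hipos
        have hmul : (i : Int) * (n / (i : Int)) = n := Int.mul_ediv_cancel' hdvd
        have hn' : 1 ≤ n / (i : Int) := by nlinarith [hmul]
        have hnt : ((n.toNat : Int)) = n := Int.toNat_of_nonneg (by omega)
        by_cases hd2 : (i : Int) ∣ (n / (i : Int))
        · rw [if_pos (by rw [beq_iff_eq, hfe, PySem.Int.mod_eq_zero_iff_dvd]; exact hd2)]
          refine iff_of_false (by simp) ?_
          intro hsq
          obtain ⟨c, hc⟩ := hd2
          have hiin : ((i * i : Nat) : Int) ∣ n := by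
            refine ⟨c, ?_⟩
            push_cast
            rw [← hmul, hc]
            ring
          have hdn : i * i ∣ n.toNat := by
            rw [← Int.natCast_dvd_natCast, hnt]; exact hiin
          exact absurd (Nat.isUnit_iff.mp (hsq i hdn)) (by omega)
        · rw [if_neg (by rw [beq_iff_eq, hfe, PySem.Int.mod_eq_zero_iff_dvd]; exact hd2)]
          rw [hfe]
          have hdle : n / (i : Int) ≤ n := Int.ediv_le_self _ (by omega)
          have hqdvd : n / (i : Int) ∣ n := ⟨(i : Int), by rw [mul_comm]; exact hmul.symm⟩
          have hinv' : ∀ j : Nat, 2 ≤ j → j < i + 1 → ¬ ((j : Int) ∣ n / (i : Int)) := by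
            intro j hj2 hji hd
            rcases Nat.lt_or_ge j i with hji' | hji'
            · exact hinv j hj2 hji' (dvd_trans hd hqdvd)
            · have : j = i := by omega
              exact hd2 (this ▸ hd)
          rw [ih (n / (i : Int)) (i + 1) (by push_cast; omega) (by omega) hn' hinv']
          -- i is prime: it divides n and nothing smaller than i divides n
          have hip : Nat.Prime i := by
            rw [Nat.prime_def_lt]
            refine ⟨h2, fun m hm hmd => ?_⟩
            by_contra hm1
            have hm0 : m ≠ 0 := by rintro rfl; simp at hmd; omega
            have hm2 : 2 ≤ m := by omega
            refine hinv m hm2 hm ?_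
            exact dvd_trans (Int.natCast_dvd_natCast.mpr hmd) hdvd
          have hnn : n.toNat = i * (n / (i : Int)).toNat := by
            have hq0 : (0 : Int) ≤ n / (i : Int) := by omega
            have : ((i * (n / (i : Int)).toNat : Nat) : Int) = n := by
              push_cast [Int.toNat_of_nonneg hq0]; exact hmul
            omega
          have hcop : Nat.Coprime i (n / (i : Int)).toNat := by
            rw [Nat.Prime.coprime_iff_not_dvd hip]
            intro hd
            refine hd2 ?_
            have := Int.natCast_dvd_natCast.mpr hd
            rwa [Int.toNat_of_nonneg (by omega)] at this
          rw [hnn, Nat.squarefree_mul hcop]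
          simp [Irreducible.squarefree hip]
      · rw [if_neg (by rw [beq_iff_eq, PySem.Int.mod_eq_zero_iff_dvd]; exact hdvd)]
        have hinv' : ∀ j : Nat, 2 ≤ j → j < i + 1 → ¬ ((j : Int) ∣ n) := by
          intro j hj2 hji
          rcases Nat.lt_or_ge j i with hji' | hji'
          · exact hinv j hj2 hji'
          · have : j = i := by omega
            exact this ▸ hdvd
        exact ih n (i + 1) (by push_cast; omega) (by omega) hn hinv'
    · rw [isSqFreeBLoop, dif_neg hle]
      exact iff_of_true rfl (exitB n i hn hle hinv)

theorem PA_iff (n : Int) (hn : 1 ≤ n) :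
    (∀ k : Nat, 2 ≤ k → (k : Int) * k ≤ n → ¬ ((k : Int) * (k : Int) ∣ n)) ↔ Squarefree n.toNat := by
  have hnt : ((n.toNat : Int)) = n := Int.toNat_of_nonneg (by omega)
  constructor
  · intro h
    rw [Nat.squarefree_iff_prime_squarefree]
    intro p hp hd
    have hp2 : 2 ≤ p := hp.two_le
    by_cases hpn : (p : Int) * p ≤ n
    · refine h p hp2 hpn ?_
      have := Int.natCast_dvd_natCast.mpr hd
      push_cast at this
      rwa [hnt] at this
    · have h1 : p * p ≤ n.toNat := Nat.le_of_dvd (by omega) hd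
      have : ((p * p : Nat) : Int) ≤ n := by rw [← hnt]; exact_mod_cast h1
      push_cast at this
      exact hpn this
  · intro h k hk hkn hd
    have hdn : k * k ∣ n.toNat := by
      rw [← Int.natCast_dvd_natCast, hnt]; push_cast; exact hd
    have := Nat.isUnit_iff.mp (h k hdn)
    omega

theorem sf_eq (n : Int) : isSqFreeA n = isSqFreeB n := by
  by_cases h4 : ((2 : Nat) : Int) * (2 : Nat) ≤ n
  · have hn : 1 ≤ n := by push_cast at h4; omega
    rw [isSqFreeA, isSqFreeB, Bool.eq_iff_iff,
      sfALoop_char (n + 1 - ((2 : Nat) : Int) * (2 : Nat)).toNat n 2 le_rfl,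
      sfBLoop_char (n + 1 - ((2 : Nat) : Int) * (2 : Nat)).toNat n 2 le_rfl le_rfl hn
        (by intro j hj2 hji; omega)]
    exact PA_iff n hn
  · rw [isSqFreeA, isSqFreeB, isSqFreeALoop, isSqFreeBLoop, dif_neg h4, dif_neg h4]

-- ---- A's recursion computes Cc fIndA ----

theorem dfsA_unfold (nums : List Int) (pos : Nat) (prod : Int) (subset : List Int) (res : Int) :
    dfsA nums pos prod subset res = dfsForA nums pos prod subset (res + fIndA prod) := by
  rw [dfsA]
  congr 1
  unfold fIndA
  split_ifs <;> ring

theorem dfsForA_eq (nums : List Int) :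
    ∀ (k i : Nat) (prod : Int) (subset : List Int) (res : Int), nums.length - i = k →
      dfsForA nums i prod subset res = res + Dc fIndA (nums.drop i) prod := by
  intro k
  induction k with
  | zero =>
    intro i prod subset res hk
    have hle : nums.length ≤ i := by omega
    rw [dfsForA, dif_neg (by omega), List.drop_eq_nil_of_le hle]
    simp [Dc]
  | succ m ih =>
    intro i prod subset res hk
    have hi : i < nums.length := by omega
    rw [dfsForA, dif_pos hi, dfsA_unfold,
      ih (i + 1) (prod * nums[i]) (subset ++ [nums[i]]) (res + fIndA (prod * nums[i])) (by omega),
      ih (i + 1) prod subset _ (by omega),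
      List.drop_eq_getElem_cons hi]
    show _ = res + Dc fIndA (nums[i] :: nums.drop (i + 1)) prod
    rw [Dc]
    ring

-- ---- B's dict fold sums Cc fIndB ----

theorem sum_map_overwrite (f : Int → Int) (k w c : Int) :
    ∀ (l : List (Int × Int)), (l.map Prod.fst).Nodup → (k, w) ∈ l →
      ((l.map (fun p => if (p.1 == k) = true then (k, w + c) else p)).map
          (fun pc => f pc.1 * pc.2)).sum
        = (l.map (fun pc => f pc.1 * pc.2)).sum + f k * c := by
  intro l
  induction l with
  | nil => intro _ h; simp at h
  | cons a t ih =>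
    intro hnd hmem
    obtain ⟨a1, a2⟩ := a
    rw [List.map_cons, List.nodup_cons] at hnd
    by_cases hak : a1 = k
    · subst hak
      have hw : w = a2 := by
        rcases List.mem_cons.mp hmem with he | ht
        · injection he with _ h2
        · exact absurd (List.mem_map.mpr ⟨(a1, w), ht, rfl⟩) hnd.1
      subst hw
      have htid : List.map (fun p => if (p.1 == a1) = true then (a1, w + c) else p) t
          = List.map id t := by
        apply List.map_congr_left
        intro p hp
        have hne : p.1 ≠ a1 := fun he => hnd.1 (List.mem_map.mpr ⟨p, hp, he⟩)
        simp [hne]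
      simp only [List.map_cons, beq_self_eq_true, if_true, htid, List.map_id, List.sum_cons]
      ring
    · have hmem' : (k, w) ∈ t := by
        rcases List.mem_cons.mp hmem with he | ht
        · exact absurd (by injection he with h1 _; exact h1.symm) hak
        · exact ht
      have hrec := ih hnd.2 hmem'
      simp only [List.map_cons, List.sum_cons, if_neg (show ¬ (((a1, a2).1 == k) = true) by simp [hak])]
      rw [hrec]
      ring

theorem insert_sum (f : Int → Int) (d : PySem.Dict Int Int) (hnd : d.keys.Nodup) (k c : Int) :
    sumF f (d.insert k (d.getD k 0 + c)) = sumF f d + f k * c := by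
  by_cases hc : d.contains k = true
  · have hk : k ∈ d.keys := (PySem.Dict.contains_iff_mem_keys d k).mp hc
    have hkeys : d.keys = d.items.map Prod.fst := rfl
    obtain ⟨p, hp, he⟩ := List.mem_map.mp (hkeys ▸ hk)
    obtain ⟨p1, p2⟩ := p
    simp only at he
    subst he
    have hgd : d.getD p1 0 = p2 := PySem.Dict.getD_of_mem_items d hp hnd 0
    rw [sumF, PySem.Dict.items_insert_of_contains d _ hc, hgd]
    exact sum_map_overwrite f p1 p2 c d.items (hkeys ▸ hnd) hp
  · rw [sumF, PySem.Dict.items_insert_of_not_contains d _ (by simpa using hc),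
      PySem.Dict.getD_of_not_contains d 0 (by simpa using hc)]
    simp [sumF]

theorem foldl_ins_sum (f : Int → Int) (x : Int) :
    ∀ (L : List (Int × Int)) (d : PySem.Dict Int Int), d.keys.Nodup →
      sumF f (L.foldl (fun nd pc => nd.insert (pc.1 * x) (nd.getD (pc.1 * x) 0 + pc.2)) d)
        = sumF f d + (L.map (fun pc => f (pc.1 * x) * pc.2)).sum := by
  intro L
  induction L with
  | nil => intro d _; simp
  | cons a t ih =>
    intro d hnd
    simp only [List.foldl_cons, List.map_cons, List.sum_cons]
    rw [ih _ (PySem.Dict.nodup_keys_insert d _ _ hnd), insert_sum f d hnd]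
    ring

theorem nodup_stepB (d : PySem.Dict Int Int) (x : Int) (hnd : d.keys.Nodup) :
    (stepB d x).keys.Nodup :=
  PySem.Dict.nodup_keys_foldl_insert_key d.items (fun pc => pc.1 * x)
    (fun nd pc => nd.getD (pc.1 * x) 0 + pc.2) d hnd

theorem stepB_sum (f : Int → Int) (d : PySem.Dict Int Int) (hnd : d.keys.Nodup) (x : Int) :
    sumF f (stepB d x) = sumF (fun p => f p + f (p * x)) d := by
  rw [stepB, foldl_ins_sum f x d.items d hnd, sumF, sumF,
    ← PySem.List.sum_map_add_int d.items (fun pc => f pc.1 * pc.2) (fun pc => f (pc.1 * x) * pc.2)]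
  congr 1
  apply List.map_congr_left
  intro p _
  ring

theorem fold_sum (f : Int → Int) :
    ∀ (xs : List Int) (d : PySem.Dict Int Int), d.keys.Nodup →
      sumF f (xs.foldl stepB d) = sumF (fun p => Cc f xs p) d := by
  intro xs
  induction xs with
  | nil => intro d _; simp [Cc, Dc]
  | cons x t ih =>
    intro d hnd
    rw [List.foldl_cons, ih (stepB d x) (nodup_stepB d x hnd), stepB_sum _ d hnd x]
    have : (fun p => Cc f t p + Cc f t (p * x)) = fun p => Cc f (x :: t) p := by
      funext p
      show _ = f p + Dc f (x :: t) p
      rw [Dc]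
      show Cc f t p + (f (p * x) + Dc f t (p * x)) = _
      rw [Cc]
      ring
    rw [← this]

theorem totalB_foldl (l : List (Int × Int)) :
    ∀ t : Int, l.foldl (fun t pc => if pc.1 ≠ 1 ∧ isSqFreeB pc.1 = true then t + pc.2 else t) t
      = t + (l.map (fun pc => fIndB pc.1 * pc.2)).sum := by
  induction l with
  | nil => intro t; simp
  | cons a l ih =>
    intro t
    rw [List.foldl_cons, ih, List.map_cons, List.sum_cons]
    unfold fIndB
    split_ifs <;> ring

theorem totalB_eq (d : PySem.Dict Int Int) : totalB d = sumF fIndB d := by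
  rw [totalB, totalB_foldl, sumF]
  ring

-- ===== VERDICT (by name: the statement is the Claim_ definition above) =====
theorem squareFreeSubsets_spec : Claim_equal_squareFreeSubsets := by
  intro nums _
  unfold Spec_squareFreeSubsets squareFreeSubsets squareFreeSubsets_alt
  congr 1
  rw [dfsA_unfold, dfsForA_eq nums (nums.length - 0) 0 1 [] _ rfl, List.drop_zero,
    totalB_eq, fold_sum fIndB nums _ (PySem.Dict.nodup_keys_ofList _)]
  have hitems : (PySem.Dict.ofList [((1 : Int), (1 : Int))]).items = [(1, 1)] := by decide
  rw [sumF, hitems]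
  have hfa : fIndA 1 = 0 := by simp [fIndA]
  have hfb : fIndB 1 = 0 := by simp [fIndB]
  have hD : Dc fIndA nums 1 = Dc fIndB nums 1 := by
    have : fIndA = fIndB := by
      funext p; unfold fIndA fIndB; rw [sf_eq]
    rw [this]
  simp [Cc, hfa, hfb, hD]
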